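-- pv_equiv track=rewrite | github.com/marcsantiago/Hack-This-Site | programming12.py | generate_answer_from_raw_string
-- ===== SOURCE A (Python) =====
-- import math
--
-- def is_prime(n):
--     if n == 2:
--         return True
--     if n % 2 == 0 or n <= 1:
--         return False
--     sqr = int(math.sqrt(n)) + 1
--     for divisor in range(3, sqr, 2):
--         if n % divisor == 0:
--             return False
--     return True
--
-- def comp_prime_product(number_list):
--     prime_numbers = []
--     composite_numbers =[]
--     for num in number_list:
--         if is_prime(int(num)):
--             prime_numbers.append(int(num))
--         else:
--             composite_numbers.append(int(num))
--
--     composite_numbers = [i for i in composite_numbers if i != 1]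
--     composite_numbers = [i for i in composite_numbers if i != 0]
--
--     return sum(prime_numbers) * sum(composite_numbers)
--
-- def trunc_and_shift(char_list):
--     char_list = char_list[:25]
--     result = ""
--     for char in char_list:
--         x = ord(char)
--         result += chr(x + 1)
--
--     return result
--
-- def generate_answer_from_raw_string(string):
--     '''Returns the answer to the problem'''
--     numbers = []
--     letter = []
--     for ch in string:
--         if ch.isdigit():
--             numbers.append(ch)
--         else:
--             letter.append(ch)
--     return trunc_and_shift(letter) + str(comp_prime_product(numbers))
-- ===== SOURCE B (Python) =====
-- def generate_answer_from_raw_string(string):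
--     '''Returns the answer to the problem'''
--     shifted = []
--     kept = 0
--     prime_sum = 0
--     comp_sum = 0
--     for ch in string:
--         if ch.isdigit():
--             d = int(ch)
--             if d in (2, 3, 5, 7):
--                 prime_sum += d
--             elif d not in (0, 1):
--                 comp_sum += d
--         elif kept < 25:
--             shifted.append(chr(ord(ch) + 1))
--             kept += 1
--     return ''.join(shifted) + str(prime_sum * comp_sum)
-- ===== Notes on version B (the rewrite author's own statement) =====
-- stated objective: simpler
-- what changed: Replaced A's three helpers and multi-pass decomposition (partition into digit/non-digit lists, re-partition digits into prime/composite lists with a trial-division primality test, two filter passes, a separate truncate-and-shift pass) with a single fused traversal that accumulates the shifted first-25 non-digit characters, a prime-digit sum and a composite-digit sum directly.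
import Mathlib
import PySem

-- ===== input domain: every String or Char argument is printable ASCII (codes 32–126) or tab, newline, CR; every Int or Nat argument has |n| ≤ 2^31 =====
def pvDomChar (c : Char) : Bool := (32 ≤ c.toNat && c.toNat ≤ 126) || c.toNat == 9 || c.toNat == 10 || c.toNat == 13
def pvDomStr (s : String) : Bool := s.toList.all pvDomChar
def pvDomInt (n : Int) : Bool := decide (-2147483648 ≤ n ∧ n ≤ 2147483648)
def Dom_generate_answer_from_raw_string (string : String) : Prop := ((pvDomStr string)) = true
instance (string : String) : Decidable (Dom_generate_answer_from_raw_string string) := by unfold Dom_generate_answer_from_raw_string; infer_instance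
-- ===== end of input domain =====

-- B fuses A's three helpers and multi-pass list decomposition into one accumulating
-- traversal (shifted letters, prime-digit sum, composite-digit sum); objective: simpler.


-- ===== PORT A =====
-- kernel-transparent floor square root: |{k ≤ n : k*k ≤ n}| - 1 = isqrt n
def isqrt (n : Nat) : Nat := ((List.range (n + 1)).filter (fun k => k * k ≤ n)).length - 1

def is_prime (n : Int) : Bool :=
  if n = 2 then true
  else if PySem.Int.mod n 2 = 0 || n ≤ 1 then false
  else
    -- int(math.sqrt(n)) + 1: integer square root; exact for the single-digit values that reach it
    let sqr : Int := (isqrt n.toNat : Int) + 1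
    -- the for-loop with early 'return False': no divisor in the range divides n
    (PySem.List.pyRange 3 sqr 2).all (fun divisor => !(PySem.Int.mod n divisor = 0))

def comp_prime_product (number_list : List Char) : Int :=
  let pc := number_list.foldl (fun (pc : List Int × List Int) num =>
      -- int(num): num is always a single digit character here, so parsing cannot fail
      let v := (PySem.Int.ofChars? [num]).getD 0
      if is_prime v then (pc.1 ++ [v], pc.2) else (pc.1, pc.2 ++ [v])) ([], [])
  let composite1 := pc.2.filter (fun i => !(i = 1))
  let composite2 := composite1.filter (fun i => !(i = 0))
  pc.1.sum * composite2.sum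

def trunc_and_shift (char_list : List Char) : List Char :=
  let cl := PySem.List.slice char_list none (some 25)
  -- result += chr(ord(char) + 1)
  cl.foldl (fun result char => result ++ [Char.ofNat (char.toNat + 1)]) []

def generate_answer_from_raw_string (string : String) : String :=
  let nl := string.toList.foldl (fun (nl : List Char × List Char) ch =>
      if PySem.Chars.isdigit ch then (nl.1 ++ [ch], nl.2) else (nl.1, nl.2 ++ [ch])) ([], [])
  String.ofList (trunc_and_shift nl.2 ++ PySem.Int.toChars (comp_prime_product nl.1))

-- ===== PORT B =====
-- state: (shifted chars so far, kept count, prime_sum, comp_sum)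
def altStep (st : List Char × Int × Int × Int) (ch : Char) : List Char × Int × Int × Int :=
  if PySem.Chars.isdigit ch then
    let d := (PySem.Int.ofChars? [ch]).getD 0      -- int(ch); ch is a digit, cannot fail
    if d = 2 ∨ d = 3 ∨ d = 5 ∨ d = 7 then (st.1, st.2.1, st.2.2.1 + d, st.2.2.2)
    else if ¬ (d = 0 ∨ d = 1) then (st.1, st.2.1, st.2.2.1, st.2.2.2 + d)
    else st
  else if st.2.1 < 25 then (st.1 ++ [Char.ofNat (ch.toNat + 1)], st.2.1 + 1, st.2.2.1, st.2.2.2)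
  else st

def generate_answer_from_raw_string_alt (string : String) : String :=
  let st := string.toList.foldl altStep ([], 0, 0, 0)
  String.ofList (st.1 ++ PySem.Int.toChars (st.2.2.1 * st.2.2.2))

-- ===== PRECONDITION & SPEC =====
def Spec_generate_answer_from_raw_string (string : String) (out : String) : Prop := out = generate_answer_from_raw_string_alt string
instance (string : String) (out : String) : Decidable (Spec_generate_answer_from_raw_string string out) := by unfold Spec_generate_answer_from_raw_string; infer_instance

-- ===== CLAIM (what is proved, stated in full; the proofs are below) =====
def Claim_equal_generate_answer_from_raw_string : Prop := ∀ (string : String), Dom_generate_answer_from_raw_string string → Spec_generate_answer_from_raw_string string (generate_answer_from_raw_string string)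

-- ===== LEMMAS AND PROOFS =====

-- spec helpers (proof-only)
def dval (c : Char) : Int := (PySem.Int.ofChars? [c]).getD 0
def isP (c : Char) : Bool := c = '2' || c = '3' || c = '5' || c = '7'
def isC (c : Char) : Bool := c = '4' || c = '6' || c = '8' || c = '9'
def psum (l : List Char) : Int := ((l.filter isP).map dval).sum
def csum (l : List Char) : Int := ((l.filter isC).map dval).sum
def shift (c : Char) : Char := Char.ofNat (c.toNat + 1)
def nd (c : Char) : Bool := !PySem.Chars.isdigit c

lemma digit_cases (c : Char) (h : PySem.Chars.isdigit c = true) :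
    c = '0' ∨ c = '1' ∨ c = '2' ∨ c = '3' ∨ c = '4' ∨ c = '5' ∨ c = '6' ∨ c = '7' ∨ c = '8' ∨ c = '9' := by
  simp only [PySem.Chars.isdigit, Bool.and_eq_true, decide_eq_true_eq, Char.le_def,
    UInt32.le_iff_toNat_le] at h
  have heq : ∀ d : Char, c.val.toNat = d.val.toNat → c = d := by
    intro d hd; exact Char.ext (UInt32.toNat_inj.mp hd)
  have h1' : 48 ≤ c.val.toNat := h.1
  have h2' : c.val.toNat ≤ 57 := h.2
  interval_cases hv : c.val.toNat <;>
    [exact .inl (heq _ rfl); exact .inr (.inl (heq _ rfl)); exact .inr (.inr (.inl (heq _ rfl)));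
     exact .inr (.inr (.inr (.inl (heq _ rfl)))); exact .inr (.inr (.inr (.inr (.inl (heq _ rfl)))));
     exact .inr (.inr (.inr (.inr (.inr (.inl (heq _ rfl))))));
     exact .inr (.inr (.inr (.inr (.inr (.inr (.inl (heq _ rfl)))))));
     exact .inr (.inr (.inr (.inr (.inr (.inr (.inr (.inl (heq _ rfl))))))));
     exact .inr (.inr (.inr (.inr (.inr (.inr (.inr (.inr (.inl (heq _ rfl)))))))));
     exact .inr (.inr (.inr (.inr (.inr (.inr (.inr (.inr (.inr (heq _ rfl)))))))))]

lemma afold_eq (l : List Char) (ns ls : List Char) :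
    l.foldl (fun (nl : List Char × List Char) ch =>
      if PySem.Chars.isdigit ch then (nl.1 ++ [ch], nl.2) else (nl.1, nl.2 ++ [ch])) (ns, ls)
    = (ns ++ l.filter PySem.Chars.isdigit, ls ++ l.filter nd) := by
  induction l generalizing ns ls with
  | nil => simp
  | cons a t ih =>
    by_cases ha : PySem.Chars.isdigit a = true <;>
      simp [ha, ih, nd]

lemma fold_dval (ch : Char) : (PySem.Int.ofChars? [ch]).getD 0 = dval ch := rfl


lemma digit_facts (a : Char) (h : PySem.Chars.isdigit a = true) :
    (is_prime (dval a) = isP a)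
    ∧ (isP a = true → isC a = false)
    ∧ (isC a = true → isP a = false ∧ dval a ≠ 0 ∧ dval a ≠ 1)
    ∧ (isP a = false → isC a = false → (dval a = 0 ∨ dval a = 1))
    ∧ ((dval a = 2 ∨ dval a = 3 ∨ dval a = 5 ∨ dval a = 7) ↔ isP a = true) := by
  rcases digit_cases a h with h0|h0|h0|h0|h0|h0|h0|h0|h0|h0 <;> subst h0 <;>
    refine ⟨by decide, by decide, by decide, by decide, by decide⟩

lemma cppfold_eq (l : List Char) (h : ∀ c ∈ l, PySem.Chars.isdigit c = true) (ps cs : List Int) :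
    l.foldl (fun (pc : List Int × List Int) num =>
      let v := (PySem.Int.ofChars? [num]).getD 0
      if is_prime v then (pc.1 ++ [v], pc.2) else (pc.1, pc.2 ++ [v])) (ps, cs)
    = (ps ++ (l.filter isP).map dval, cs ++ (l.filter (fun c => !isP c)).map dval) := by
  induction l generalizing ps cs with
  | nil => simp
  | cons a t ih =>
    have hd := h a List.mem_cons_self
    have ih' := ih (fun c hc => h c (List.mem_cons_of_mem _ hc))
    rw [List.foldl_cons]
    show List.foldl _ (if is_prime (dval a) = true then (ps ++ [dval a], cs) else (ps, cs ++ [dval a])) t = _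
    rw [(digit_facts a hd).1]
    by_cases hp : isP a = true <;> simp [hp, ih']

lemma comp_filter_eq (l : List Char) (h : ∀ c ∈ l, PySem.Chars.isdigit c = true) :
    (((l.filter (fun c => !isP c)).map dval).filter (fun i => !(i = 1))).filter (fun i => !(i = 0))
      = (l.filter isC).map dval := by
  induction l with
  | nil => simp
  | cons a t ih =>
    have hd := h a List.mem_cons_self
    have ih' := ih (fun c hc => h c (List.mem_cons_of_mem _ hc))
    obtain ⟨-, hPC, hC, hnPC, -⟩ := digit_facts a hd
    by_cases hp : isP a = true
    · simp [hp, hPC hp, ih']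
    · by_cases hc' : isC a = true
      · obtain ⟨-, h0, h1⟩ := hC hc'
        simp [hp, hc', h0, h1, ih']
      · rcases hnPC (by simpa using hp) (by simpa using hc') with h0 | h0 <;>
          simp [hp, hc', h0, ih']

lemma cpp_eq (l : List Char) (h : ∀ c ∈ l, PySem.Chars.isdigit c = true) :
    comp_prime_product l = psum l * csum l := by
  unfold comp_prime_product
  rw [cppfold_eq l h [] []]
  simp only [List.nil_append]
  rw [comp_filter_eq l h]
  rfl

lemma trunc_eq (l : List Char) :
    trunc_and_shift l = (l.take 25).map shift := by
  unfold trunc_and_shift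
  rw [PySem.List.slice_to _ (by norm_num)]
  show List.foldl (fun acc x => acc ++ [shift x]) [] (List.take (Int.toNat 25) l) = _
  rw [PySem.List.foldl_append_singleton_eq_map shift]
  simp

lemma psum_cons (a : Char) (l : List Char) :
    psum (a :: l) = if isP a then dval a + psum l else psum l := by
  by_cases hp : isP a = true <;> simp [psum, hp]

lemma csum_cons (a : Char) (l : List Char) :
    csum (a :: l) = if isC a then dval a + csum l else csum l := by
  by_cases hc : isC a = true <;> simp [csum, hc]

lemma bfold_eq (l : List Char) (sh : List Char) (k p c : Int) (hk : 0 ≤ k) (hk25 : k ≤ 25) :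
    l.foldl altStep (sh, k, p, c)
      = (sh ++ ((l.filter nd).take (25 - k).toNat).map shift,
         min (k + (l.filter nd).length) 25,
         p + psum (l.filter PySem.Chars.isdigit),
         c + csum (l.filter PySem.Chars.isdigit)) := by
  induction l generalizing sh k p c with
  | nil => simp [psum, csum]; omega
  | cons a t ih =>
    rw [List.foldl_cons]
    by_cases ha : PySem.Chars.isdigit a = true
    · obtain ⟨-, hPC, hC, hnPC, hiff⟩ := digit_facts a ha
      have hstep : altStep (sh, k, p, c) a
          = if isP a then (sh, k, p + dval a, c)
            else if isC a then (sh, k, p, c + dval a) else (sh, k, p, c) := by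
        simp only [altStep, fold_dval, ha, if_true]
        by_cases hp : isP a = true
        · rw [if_pos (hiff.mpr hp), if_pos hp]
        · rw [if_neg (fun hh => hp (hiff.mp hh))]
          by_cases hc' : isC a = true
          · obtain ⟨-, h0, h1⟩ := hC hc'
            rw [if_pos (by simp [h0, h1])]
            simp [hp, hc']
          · rcases hnPC (by simpa using hp) (by simpa using hc') with h0 | h0 <;>
            · rw [if_neg (by simp [h0])]
              simp [hp, hc']
      rw [hstep]
      have hfilters : (a :: t).filter nd = t.filter nd := by simp [nd, ha]
      have hfilterd : (a :: t).filter PySem.Chars.isdigit = a :: t.filter PySem.Chars.isdigit := by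
        simp [ha]
      by_cases hp : isP a = true
      · have hnc : isC a = false := (digit_facts a ha).2.1 hp
        rw [if_pos hp, ih _ _ _ _ hk hk25]
        simp [hfilters, hfilterd, psum_cons, csum_cons, hp, hnc]
        ring
      · rw [if_neg (by simp [hp])]
        by_cases hc' : isC a = true
        · rw [if_pos hc', ih _ _ _ _ hk hk25]
          simp [hfilters, hfilterd, psum_cons, csum_cons, hp, hc']
          ring
        · rw [if_neg (by simp [hc']), ih _ _ _ _ hk hk25]
          simp [hfilters, hfilterd, psum_cons, csum_cons, hp, hc']
    · have hstep : altStep (sh, k, p, c) a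
          = if k < 25 then (sh ++ [shift a], k + 1, p, c) else (sh, k, p, c) := by
        simp only [altStep, ha]
        rfl
      rw [hstep]
      have hfilters : (a :: t).filter nd = a :: t.filter nd := by simp [nd, ha]
      have hfilterd : (a :: t).filter PySem.Chars.isdigit = t.filter PySem.Chars.isdigit := by
        simp [ha]
      by_cases hlt : k < 25
      · have htn : (25 - k).toNat = (25 - (k + 1)).toNat + 1 := by omega
        rw [if_pos hlt, ih _ _ _ _ (by omega) (by omega)]
        simp [hfilters, hfilterd, htn, List.take_succ_cons]
        omega
      · have hk' : k = 25 := by omega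
        subst hk'
        rw [if_neg hlt, ih _ _ _ _ hk hk25]
        simp [hfilters, hfilterd]
        omega

-- ===== VERDICT (by name: the statement is the Claim_ definition above) =====
theorem generate_answer_from_raw_string_spec : Claim_equal_generate_answer_from_raw_string := by
  intro s _hdom
  unfold Spec_generate_answer_from_raw_string generate_answer_from_raw_string generate_answer_from_raw_string_alt
  rw [afold_eq, bfold_eq _ _ _ _ _ le_rfl (by norm_num)]
  simp only [List.nil_append, zero_add]
  rw [trunc_eq, cpp_eq _ (by intro c hc; exact (List.mem_filter.mp hc).2)]
  simp
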